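-- pv_equiv track=rewrite | github.com/CuiweiG/openclaw-humanitarian | src/reporting/auto_sitrep.py | _cluster_by_theme
-- ===== SOURCE A (Python) =====
-- from collections import defaultdict
--
-- def _cluster_by_theme(documents: list) -> dict:
--     """Simple keyword-based thematic clustering."""
--     clusters = defaultdict(list)
--     theme_keywords = {
--         'displacement': ['displaced', 'IDP', 'refugee', 'evacuation', 'fled'],
--         'health': ['medical', 'hospital', 'health', 'injury', 'WHO'],
--         'food': ['food', 'hunger', 'WFP', 'nutrition', 'ration'],
--         'shelter': ['shelter', 'housing', 'camp', 'collective'],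
--         'access': ['access', 'restricted', 'blocked', 'corridor'],
--     }
--     for doc in documents:
--         text = (doc.get('text', '') + ' ' + doc.get('title', '')).lower()
--         for theme, keywords in theme_keywords.items():
--             if any(kw in text for kw in keywords):
--                 clusters[theme].append(doc)
--     return dict(clusters)
-- ===== SOURCE B (Python) =====
-- _THEME_KEYWORDS = {
--     'displacement': ['displaced', 'IDP', 'refugee', 'evacuation', 'fled'],
--     'health': ['medical', 'hospital', 'health', 'injury', 'WHO'],
--     'food': ['food', 'hunger', 'WFP', 'nutrition', 'ration'],
--     'shelter': ['shelter', 'housing', 'camp', 'collective'],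
--     'access': ['access', 'restricted', 'blocked', 'corridor'],
-- }
-- # flat (keyword, theme) pairs, built once up front
-- _KEYWORD_THEME = [(kw, theme) for theme, kws in _THEME_KEYWORDS.items() for kw in kws]
--
-- def _cluster_by_theme(documents: list) -> dict:
--     """Thematic clustering by a single left-to-right positional scan of each
--     text (naive multi-pattern matching with startswith at every offset),
--     instead of one independent substring search per keyword."""
--     clusters = {}
--     for doc in documents:
--         text = (doc.get('text', '') + ' ' + doc.get('title', '')).lower()
--         matched = set()
--         for i in range(len(text)):
--             for kw, theme in _KEYWORD_THEME:
--                 if theme not in matched and text.startswith(kw, i):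
--                     matched.add(theme)
--         for theme in _THEME_KEYWORDS:
--             if theme in matched:
--                 clusters.setdefault(theme, []).append(doc)
--     return clusters
-- ===== Notes on version B (the rewrite author's own statement) =====
-- stated objective: alternative
-- what changed: B replaces A's per-theme any(kw in text) substring searches by a naive multi-pattern matcher: one left-to-right scan over the text positions testing each keyword with startswith at that offset against a flat prebuilt (keyword, theme) table, collecting matched themes in a set and then distributing the document in theme-table order.
import Mathlib
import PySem

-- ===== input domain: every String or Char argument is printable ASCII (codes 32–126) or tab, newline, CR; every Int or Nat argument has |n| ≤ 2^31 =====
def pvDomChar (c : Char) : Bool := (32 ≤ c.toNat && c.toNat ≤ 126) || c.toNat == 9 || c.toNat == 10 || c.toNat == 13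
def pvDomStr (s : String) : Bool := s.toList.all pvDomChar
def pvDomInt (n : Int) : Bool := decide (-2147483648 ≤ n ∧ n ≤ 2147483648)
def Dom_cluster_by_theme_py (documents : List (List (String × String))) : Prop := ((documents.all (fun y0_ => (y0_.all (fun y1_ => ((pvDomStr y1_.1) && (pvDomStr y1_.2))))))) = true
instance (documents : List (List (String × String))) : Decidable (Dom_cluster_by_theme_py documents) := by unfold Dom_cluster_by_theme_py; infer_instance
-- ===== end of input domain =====

set_option maxHeartbeats 1000000


-- B matches each document by ONE positional scan of the text (startswith at every offset
-- against a flat keyword->theme table, collecting themes in a set), instead of A's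
-- independent 'kw in text' search per keyword per theme; same result, alternative algorithm.

-- the theme_keywords table (shared literal data of both versions)
def pvThemes : List (String × List String) :=
  [("displacement", ["displaced", "IDP", "refugee", "evacuation", "fled"]),
   ("health", ["medical", "hospital", "health", "injury", "WHO"]),
   ("food", ["food", "hunger", "WFP", "nutrition", "ration"]),
   ("shelter", ["shelter", "housing", "camp", "collective"]),
   ("access", ["access", "restricted", "blocked", "corridor"])]

-- ===== PORT A =====
-- defaultdict append 'clusters[theme].append(doc)' is Dict.modify theme [] (· ++ [doc])
def cluster_by_theme_py (documents : List (List (String × String))) : List (String × List (List (String × String))) :=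
  (documents.foldl
    (fun clusters doc =>
      let text := PySem.Str.lower ((PySem.Dict.mk doc).getD "text" "" ++ " " ++ (PySem.Dict.mk doc).getD "title" "")
      pvThemes.foldl
        (fun cl tk =>
          if tk.2.any (fun kw => PySem.Str.isIn kw text) then cl.modify tk.1 [] (· ++ [doc]) else cl)
        clusters)
    PySem.Dict.empty).items

-- ===== PORT B =====
-- the flat (keyword, theme) table, built once up front
def pvFlat : List (String × String) := pvThemes.flatMap (fun tk => tk.2.map (fun kw => (kw, tk.1)))

-- 'text.startswith(kw, i)' with 0 ≤ i is exact: kw is a prefix of the suffix of text at i;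
-- 'theme not in matched' is the Set.contains guard; final loop 'for theme in _THEME_KEYWORDS'
-- iterates the theme names in table order, 'setdefault(t, []).append(doc)' is Dict.modify.
def cluster_by_theme_py_alt (documents : List (List (String × String))) : List (String × List (List (String × String))) :=
  (documents.foldl
    (fun clusters doc =>
      let text := PySem.Str.lower ((PySem.Dict.mk doc).getD "text" "" ++ " " ++ (PySem.Dict.mk doc).getD "title" "")
      let tl := text.toList
      let matched : PySem.Set String :=
        (List.range tl.length).foldl
          (fun m i =>
            pvFlat.foldl
              (fun m q =>
                if !(PySem.Set.contains m q.2) && PySem.Chars.startswith (tl.drop i) q.1.toList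
                then PySem.Set.add m q.2 else m)
              m)
          PySem.Set.empty
      pvThemes.foldl
        (fun cl tk =>
          if PySem.Set.contains matched tk.1 then cl.modify tk.1 [] (· ++ [doc]) else cl)
        clusters)
    PySem.Dict.empty).items

-- ===== PRECONDITION & SPEC =====
def Spec_cluster_by_theme_py (documents : List (List (String × String))) (out : List (String × List (List (String × String)))) : Prop := out = cluster_by_theme_py_alt documents
instance (documents : List (List (String × String))) (out : List (String × List (List (String × String)))) : Decidable (Spec_cluster_by_theme_py documents out) := by unfold Spec_cluster_by_theme_py; infer_instance

-- ===== CLAIM (what is proved, stated in full; the proofs are below) =====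
def Claim_equal_cluster_by_theme_py : Prop := ∀ (documents : List (List (String × String))), Dom_cluster_by_theme_py documents → Spec_cluster_by_theme_py documents (cluster_by_theme_py documents)

-- ===== LEMMAS AND PROOFS =====

-- membership after a fold whose step only ever ADDS elements described by Q
theorem pv_mem_foldl {α : Type} (step : PySem.Set String → α → PySem.Set String)
    (Q : α → String → Prop)
    (h : ∀ m a t, t ∈ step m a ↔ t ∈ m ∨ Q a t) :
    ∀ (l : List α) (m : PySem.Set String) (t : String),
      t ∈ l.foldl step m ↔ t ∈ m ∨ ∃ a ∈ l, Q a t := by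
  intro l
  induction l with
  | nil => simp
  | cons a l ih =>
    intro m t
    simp only [List.foldl_cons, ih, h, List.mem_cons]
    constructor
    · rintro ((hm | hq) | ⟨b, hb, hQ⟩)
      · exact Or.inl hm
      · exact Or.inr ⟨a, Or.inl rfl, hq⟩
      · exact Or.inr ⟨b, Or.inr hb, hQ⟩
    · rintro (hm | ⟨b, (rfl | hb), hQ⟩)
      · exact Or.inl (Or.inl hm)
      · exact Or.inl (Or.inr hQ)
      · exact Or.inr ⟨b, hb, hQ⟩

-- one position of the scan: the inner fold over the flat table adds exactly the themes
-- of the keywords that start at this position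
theorem pv_mem_inner (tl : List Char) (i : Nat) (m : PySem.Set String) (t : String) :
    t ∈ pvFlat.foldl
        (fun m q =>
          if !(PySem.Set.contains m q.2) && PySem.Chars.startswith (tl.drop i) q.1.toList
          then PySem.Set.add m q.2 else m)
        m
      ↔ t ∈ m ∨ ∃ q ∈ pvFlat, PySem.Chars.startswith (tl.drop i) q.1.toList = true ∧ t = q.2 := by
  apply pv_mem_foldl
  intro m q t
  by_cases hc : PySem.Set.contains m q.2
  · have hm : q.2 ∈ m := (PySem.Set.contains_iff m q.2).mp hc
    simp only [hc, Bool.not_true, Bool.false_and, Bool.false_eq_true, if_false]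
    constructor
    · exact Or.inl
    · rintro (h | ⟨hs, rfl⟩)
      · exact h
      · exact hm
  · simp only [Bool.not_eq_true] at hc
    simp only [hc, Bool.not_false, Bool.true_and]
    by_cases hs : PySem.Chars.startswith (tl.drop i) q.1.toList = true
    · simp [hs, PySem.Set.mem_add]
    · simp only [Bool.not_eq_true] at hs
      simp [hs]

-- full characterisation of the matched set of a document
theorem pv_mem_matched (tl : List Char) (t : String) :
    t ∈ (List.range tl.length).foldl
        (fun m i =>
          pvFlat.foldl
            (fun m q =>
              if !(PySem.Set.contains m q.2) && PySem.Chars.startswith (tl.drop i) q.1.toList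
              then PySem.Set.add m q.2 else m)
            m)
        PySem.Set.empty
      ↔ ∃ i ∈ List.range tl.length, ∃ q ∈ pvFlat,
          PySem.Chars.startswith (tl.drop i) q.1.toList = true ∧ t = q.2 := by
  rw [pv_mem_foldl _ (fun i t => ∃ q ∈ pvFlat,
        PySem.Chars.startswith (tl.drop i) q.1.toList = true ∧ t = q.2)
      (fun m i t => pv_mem_inner tl i m t)]
  simp [PySem.Set.empty]

-- theme names of the table are pairwise distinct keys
theorem pv_themes_inj : ∀ a ∈ pvThemes, ∀ b ∈ pvThemes, a.1 = b.1 → a = b := by decide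

-- no keyword of the table is empty
theorem pv_kw_ne_nil : ∀ tk ∈ pvThemes, ∀ kw ∈ tk.2, kw.toList ≠ [] := by decide

-- for a fixed table row, a bounded positional hit for some keyword ⟺ some keyword occurs in text
theorem pv_theme_cond (tl : List Char) (tk : String × List String) (htk : tk ∈ pvThemes) :
    (∃ i ∈ List.range tl.length, ∃ q ∈ pvFlat,
        PySem.Chars.startswith (tl.drop i) q.1.toList = true ∧ tk.1 = q.2)
      ↔ ∃ kw ∈ tk.2, PySem.Chars.isIn kw.toList tl = true := by
  constructor
  · rintro ⟨i, _, q, hq, hsw, hEq⟩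
    simp only [pvFlat, List.mem_flatMap, List.mem_map] at hq
    obtain ⟨tk', htk', kw, hkw, rfl⟩ := hq
    have : tk' = tk := pv_themes_inj tk' htk' tk htk hEq.symm
    subst this
    refine ⟨kw, hkw, ?_⟩
    rw [← PySem.Chars.exists_prefix_drop_iff_isIn kw.toList tl]
    exact ⟨i, (PySem.Chars.startswith_iff _ _).mp hsw⟩
  · rintro ⟨kw, hkw, hin⟩
    obtain ⟨j, hpre⟩ := (PySem.Chars.exists_prefix_drop_iff_isIn kw.toList tl).mpr hin
    have hne : kw.toList ≠ [] := pv_kw_ne_nil tk htk kw hkw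
    have hj : j < tl.length := by
      by_contra hge
      push Not at hge
      rw [List.drop_eq_nil_of_le hge] at hpre
      exact hne (List.prefix_nil.mp hpre)
    refine ⟨j, List.mem_range.mpr hj, (kw, tk.1), ?_, (PySem.Chars.startswith_iff _ _).mpr hpre, rfl⟩
    simp only [pvFlat, List.mem_flatMap, List.mem_map]
    exact ⟨tk, htk, kw, hkw, rfl⟩

-- per-document step equality of the two versions
theorem pv_step_eq (doc : List (String × String))
    (clusters : PySem.Dict String (List (List (String × String)))) :
    (let text := PySem.Str.lower ((PySem.Dict.mk doc).getD "text" "" ++ " " ++ (PySem.Dict.mk doc).getD "title" "")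
     pvThemes.foldl
       (fun cl tk =>
         if tk.2.any (fun kw => PySem.Str.isIn kw text) then cl.modify tk.1 [] (· ++ [doc]) else cl)
       clusters)
    = (let text := PySem.Str.lower ((PySem.Dict.mk doc).getD "text" "" ++ " " ++ (PySem.Dict.mk doc).getD "title" "")
       let tl := text.toList
       let matched : PySem.Set String :=
         (List.range tl.length).foldl
           (fun m i =>
             pvFlat.foldl
               (fun m q =>
                 if !(PySem.Set.contains m q.2) && PySem.Chars.startswith (tl.drop i) q.1.toList
                 then PySem.Set.add m q.2 else m)
               m)
           PySem.Set.empty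
       pvThemes.foldl
         (fun cl tk =>
           if PySem.Set.contains matched tk.1 then cl.modify tk.1 [] (· ++ [doc]) else cl)
         clusters) := by
  simp only
  apply PySem.List.foldl_congr_mem'
  intro tk htk cl
  congr 1
  rw [eq_iff_iff, PySem.Set.contains_iff, pv_mem_matched, pv_theme_cond _ tk htk]
  simp [List.any_eq_true, PySem.Str.isIn]

-- ===== VERDICT (by name: the statement is the Claim_ definition above) =====
theorem cluster_by_theme_py_spec : Claim_equal_cluster_by_theme_py := by
  intro documents _
  unfold Spec_cluster_by_theme_py cluster_by_theme_py cluster_by_theme_py_alt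
  exact congrArg PySem.Dict.items
    (List.foldl_ext _ _ _ (fun cl doc _ => pv_step_eq doc cl))
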